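-- pv_equiv track=rewrite | github.com/RedBearAK/PDF-Manipulator | tests/test_format_page_ranges.py | format_page_ranges
-- ===== SOURCE A (Python) =====
-- def format_page_ranges(pages: set[int]) -> str:
--     """Format page numbers into compact range notation."""
--     if not pages:
--         return "none"
--
--     sorted_pages = sorted(pages)
--     ranges = []
--     start = sorted_pages[0]
--     end = start
--
--     for page in sorted_pages[1:]:
--         if page == end + 1:
--             end = page
--         else:
--             if start == end:
--                 ranges.append(str(start))
--             else:
--                 ranges.append(f"{start}-{end}")
--             start = page
--             end = page
--
--     # Add final range
--     if start == end:
--         ranges.append(str(start))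
--     else:
--         ranges.append(f"{start}-{end}")
--
--     return ", ".join(ranges)
-- ===== SOURCE B (Python) =====
-- def format_page_ranges(pages: set[int]) -> str:
--     """Format page numbers into compact range notation via boundary detection:
--     a run starts at x iff x-1 is not in the set and ends at y iff y+1 is not
--     in the set; sorting the starts and the ends pairs them up run by run."""
--     if not pages:
--         return "none"
--     starts = sorted(x for x in pages if x - 1 not in pages)
--     ends = sorted(x for x in pages if x + 1 not in pages)
--     return ", ".join(str(a) if a == b else f"{a}-{b}" for a, b in zip(starts, ends))
-- ===== Notes on version B (the rewrite author's own statement) =====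
-- stated objective: alternative
-- what changed: A's sorted single-pass start/end state machine with a duplicated final flush is replaced by order-independent boundary detection: run starts (x with x-1 not in the set) and run ends (x with x+1 not in the set) are collected by pure membership tests, each sorted, and zipped into the parts.
import Mathlib
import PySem

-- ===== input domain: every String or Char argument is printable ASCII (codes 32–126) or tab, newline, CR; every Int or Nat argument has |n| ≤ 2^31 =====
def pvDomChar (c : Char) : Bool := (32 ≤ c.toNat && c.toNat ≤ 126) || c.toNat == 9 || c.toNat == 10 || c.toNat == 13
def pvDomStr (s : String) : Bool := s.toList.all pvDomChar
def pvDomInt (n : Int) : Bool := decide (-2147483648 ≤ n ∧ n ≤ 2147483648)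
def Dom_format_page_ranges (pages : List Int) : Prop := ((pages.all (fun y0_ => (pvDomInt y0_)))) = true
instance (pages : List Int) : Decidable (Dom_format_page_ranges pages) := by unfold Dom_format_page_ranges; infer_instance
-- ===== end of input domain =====

-- B replaces A's sorted single-pass start/end state machine by order-independent boundary
-- detection (run starts = x with x-1 not in the set, run ends = x with x+1 not in the set,
-- sorted and zipped); same asymptotic cost, alternative structure.
-- The Python argument is a set[int]; its List Int encoding holds the distinct elements.

-- ===== PORT A =====
-- A's "str(start)" / f"{start}-{end}" part
def faPart (start e : Int) : List Char :=
  if start = e then PySem.Int.toChars start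
  else PySem.Int.toChars start ++ ['-'] ++ PySem.Int.toChars e

-- A's for-loop over sorted_pages[1:], state (start, end, ranges), plus the post-loop flush
def faLoop : List Int → Int → Int → List (List Char) → List (List Char)
  | [], start, e, ranges => ranges ++ [faPart start e]
  | page :: rest, start, e, ranges =>
    if page = e + 1 then faLoop rest start page ranges
    else faLoop rest page page (ranges ++ [faPart start e])

def format_page_ranges (pages : List Int) : String :=
  -- 'if not pages: return "none"': the set is empty iff sorted(pages) is []
  match PySem.List.sorted (PySem.Set.ofList pages) (fun x => x) false with
  | [] => "none"
  | s0 :: tl => String.ofList (PySem.Chars.join [',', ' '] (faLoop tl s0 s0 []))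

-- ===== PORT B =====
-- B's "str(a)" / f"{a}-{b}" part
def fbPart (a b : Int) : List Char :=
  if a = b then PySem.Int.toChars a
  else PySem.Int.toChars a ++ ['-'] ++ PySem.Int.toChars b

def format_page_ranges_alt (pages : List Int) : String :=
  if pages = [] then "none"
  else
    let s : PySem.Set Int := PySem.Set.ofList pages
    -- starts = sorted(x for x in pages if x - 1 not in pages)
    let starts := PySem.List.sorted (s.filter (fun x => !(PySem.Set.contains s (x - 1)))) (fun x => x) false
    -- ends = sorted(x for x in pages if x + 1 not in pages)
    let ends := PySem.List.sorted (s.filter (fun x => !(PySem.Set.contains s (x + 1)))) (fun x => x) false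
    String.ofList (PySem.Chars.join [',', ' '] (List.zipWith fbPart starts ends))

-- ===== PRECONDITION & SPEC =====
def Spec_format_page_ranges (pages : List Int) (out : String) : Prop := out = format_page_ranges_alt pages
instance (pages : List Int) (out : String) : Decidable (Spec_format_page_ranges pages out) := by unfold Spec_format_page_ranges; infer_instance

-- ===== CLAIM (what is proved, stated in full; the proofs are below) =====
def Claim_equal_format_page_ranges : Prop := ∀ (pages : List Int), Dom_format_page_ranges pages → Spec_format_page_ranges pages (format_page_ranges pages)

-- ===== LEMMAS AND PROOFS =====

-- Proof-only helpers: peel the leading maximal consecutive run of a sorted list.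
def fbRun : Int → List Int → (Int × List Int)
  | prev, x :: xs => if x = prev + 1 then fbRun x xs else (prev, x :: xs)
  | prev, [] => (prev, [])

theorem fbRun_length_le (prev : Int) (xs : List Int) : (fbRun prev xs).2.length ≤ xs.length := by
  induction xs generalizing prev with
  | nil => simp [fbRun]
  | cons x xs ih =>
    simp only [fbRun]
    split
    · exact Nat.le_succ_of_le (ih x)
    · simp

def fbParts : List Int → List (List Char)
  | [] => []
  | lo :: t => fbPart lo (fbRun lo t).1 :: fbParts (fbRun lo t).2
termination_by l => l.length
decreasing_by simpa [Nat.lt_succ_iff] using fbRun_length_le lo t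

theorem fbParts_nil : fbParts [] = [] := by rw [fbParts]

theorem fbParts_cons (lo : Int) (t : List Int) :
    fbParts (lo :: t) = fbPart lo (fbRun lo t).1 :: fbParts (fbRun lo t).2 := by rw [fbParts]

-- A's loop with open run [start, e] and emitted parts `ranges` computes `ranges` followed by
-- the run decomposition: the open run extended by fbRun, then fbParts on the remainder.
theorem faLoop_eq (tl : List Int) : ∀ (start e : Int) (ranges : List (List Char)),
    faLoop tl start e ranges = ranges ++ (faPart start (fbRun e tl).1 :: fbParts (fbRun e tl).2) := by
  induction tl with
  | nil => intro start e ranges; simp [faLoop, fbRun, fbParts_nil]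
  | cons page rest ih =>
    intro start e ranges
    simp only [faLoop, fbRun]
    split
    · exact ih start page ranges
    · rw [ih page page (ranges ++ [faPart start e])]
      simp [fbParts_cons, faPart, fbPart]

theorem faLoop_eq_fbParts (s0 : Int) (tl : List Int) :
    faLoop tl s0 s0 [] = fbParts (s0 :: tl) := by
  rw [faLoop_eq tl s0 s0 [], fbParts_cons]
  simp [faPart, fbPart]

-- fbRun on a strictly increasing tail: the peeled run is exactly the interval [prev, hi],
-- and everything left over is ≥ hi + 2.
theorem fbRun_spec : ∀ (t : List Int) (prev : Int), (prev :: t).Pairwise (· < ·) →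
    ∃ run : List Int,
      t = run ++ (fbRun prev t).2 ∧
      prev ≤ (fbRun prev t).1 ∧
      (∀ x : Int, x ∈ prev :: run ↔ prev ≤ x ∧ x ≤ (fbRun prev t).1) ∧
      (∀ x ∈ (fbRun prev t).2, (fbRun prev t).1 + 2 ≤ x) := by
  intro t
  induction t with
  | nil =>
    intro prev _
    refine ⟨[], by simp [fbRun], le_refl _, ?_, by simp [fbRun]⟩
    intro x; simp [fbRun]; omega
  | cons x xs ih =>
    intro prev hp
    have hp' : (x :: xs).Pairwise (· < ·) := hp.of_cons
    have hpx : prev < x := (List.pairwise_cons.1 hp).1 x List.mem_cons_self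
    by_cases hx : x = prev + 1
    · obtain ⟨run', h1, h2, h3, h4⟩ := ih x hp'
      have hr : fbRun prev (x :: xs) = fbRun x xs := by simp [fbRun, hx]
      refine ⟨x :: run', ?_, ?_, ?_, ?_⟩
      · rw [hr]; simpa using h1
      · rw [hr]; omega
      · intro y
        rw [hr]
        constructor
        · intro hy
          rcases List.mem_cons.1 hy with h | hy'
          · subst h; omega
          · have := (h3 y).1 hy'; omega
        · intro hy
          by_cases hyp : y = prev
          · exact hyp ▸ List.mem_cons_self
          · exact List.mem_cons_of_mem _ ((h3 y).2 ⟨by omega, hy.2⟩)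
      · intro y hy; rw [hr] at hy ⊢; exact h4 y hy
    · have hr : fbRun prev (x :: xs) = (prev, x :: xs) := by simp [fbRun, hx]
      refine ⟨[], by simp [hr], by simp [hr], ?_, ?_⟩
      · intro y; simp [hr]; omega
      · intro y hy
        rw [hr] at hy ⊢
        rcases List.mem_cons.1 hy with h | hy'
        · omega
        · have hxy : x < y := (List.pairwise_cons.1 hp').1 y hy'
          omega

-- A nodup list whose predicate holds exactly at a ∈ b filters to [a].
theorem filter_eq_single (a : Int) (p : Int → Bool) :
    ∀ (b : List Int), b.Nodup → a ∈ b → (∀ y ∈ b, (p y = true ↔ y = a)) →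
    b.filter p = [a] := by
  intro b
  induction b with
  | nil => intro _ ha; cases ha
  | cons z zs ih =>
    intro hnd ha hp
    by_cases hz : z = a
    · have hpz : p z = true := (hp z List.mem_cons_self).2 hz
      rw [List.filter_cons_of_pos hpz]
      have hzs : zs.filter p = [] := by
        rw [List.filter_eq_nil_iff]
        intro y hy hpy
        have hya : y = a := (hp y (List.mem_cons_of_mem _ hy)).1 hpy
        exact (List.nodup_cons.1 hnd).1 (by rw [hz]; exact hya ▸ hy)
      rw [hzs, hz]
    · have hpz : ¬ (p z = true) := fun hpz => hz ((hp z List.mem_cons_self).1 hpz)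
      rw [List.filter_cons_of_neg (by simpa using hpz)]
      have ha' : a ∈ zs := by
        rcases List.mem_cons.1 ha with h | h
        · exact absurd h.symm hz
        · exact h
      exact ih (List.nodup_cons.1 hnd).2 ha' (fun y hy => hp y (List.mem_cons_of_mem _ hy))

-- Core: on a strictly increasing list, zipping the boundary filters gives the run decomposition.
theorem zip_filter_eq_fbParts : ∀ (n : Nat) (l : List Int), l.length ≤ n → l.Pairwise (· < ·) →
    List.zipWith fbPart
      (l.filter (fun x => !(decide ((x - 1) ∈ l))))
      (l.filter (fun x => !(decide ((x + 1) ∈ l)))) = fbParts l := by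
  intro n
  induction n with
  | zero =>
    intro l hl _
    have : l = [] := List.length_eq_zero_iff.1 (Nat.le_zero.1 hl)
    subst this; simp [fbParts_nil]
  | succ n ih =>
    intro l hl hp
    cases l with
    | nil => simp [fbParts_nil]
    | cons prev t =>
      obtain ⟨run, ht, hph, hmem, hrest⟩ := fbRun_spec t prev hp
      have hl' : prev :: t = (prev :: run) ++ (fbRun prev t).2 := by simp [← ht]
      have hmemL : ∀ x : Int, x ∈ prev :: t ↔ ((prev ≤ x ∧ x ≤ (fbRun prev t).1) ∨ x ∈ (fbRun prev t).2) := by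
        intro x
        rw [hl', List.mem_append, hmem x]
      have hndL : (prev :: t).Nodup := hp.nodup
      have hndB : (prev :: run).Nodup := by
        rw [hl'] at hndL; exact (List.nodup_append.1 hndL).1
      have hpR : (fbRun prev t).2.Pairwise (· < ·) := by
        rw [hl'] at hp; exact hp.sublist (List.sublist_append_right _ _)
      have hSblock : (prev :: run).filter (fun x => !(decide ((x - 1) ∈ prev :: t))) = [prev] := by
        apply filter_eq_single prev _ _ hndB List.mem_cons_self
        intro y hy
        have hy' := (hmem y).1 hy
        constructor
        · intro hpy
          by_contra hne
          have hm : y - 1 ∈ prev :: t := (hmemL (y - 1)).2 (Or.inl ⟨by omega, by omega⟩)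
          simp [hm] at hpy
        · intro h
          have hm : ¬ ((y - 1) ∈ prev :: t) := by
            rw [hmemL]
            rintro (⟨h1, h2⟩ | h3)
            · omega
            · have := hrest _ h3; omega
          simp [hm]
      have hEblock : (prev :: run).filter (fun x => !(decide ((x + 1) ∈ prev :: t))) = [(fbRun prev t).1] := by
        apply filter_eq_single (fbRun prev t).1 _ _ hndB ((hmem (fbRun prev t).1).2 ⟨hph, le_refl _⟩)
        intro y hy
        have hy' := (hmem y).1 hy
        constructor
        · intro hpy
          by_contra hne
          have hm : y + 1 ∈ prev :: t := (hmemL (y + 1)).2 (Or.inl ⟨by omega, by omega⟩)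
          simp [hm] at hpy
        · intro h
          have hm : ¬ ((y + 1) ∈ prev :: t) := by
            rw [hmemL]
            rintro (⟨h1, h2⟩ | h3)
            · omega
            · have := hrest _ h3; omega
          simp [hm]
      have hScongr : (fbRun prev t).2.filter (fun x => !(decide ((x - 1) ∈ prev :: t)))
          = (fbRun prev t).2.filter (fun x => !(decide ((x - 1) ∈ (fbRun prev t).2))) := by
        apply List.filter_congr
        intro y hy
        have hyge := hrest _ hy
        have hiff : ((y - 1) ∈ prev :: t) ↔ ((y - 1) ∈ (fbRun prev t).2) := by
          rw [hmemL]
          exact ⟨fun h => h.resolve_left (fun ⟨h1, h2⟩ => by omega), Or.inr⟩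
        simp [hiff]
      have hEcongr : (fbRun prev t).2.filter (fun x => !(decide ((x + 1) ∈ prev :: t)))
          = (fbRun prev t).2.filter (fun x => !(decide ((x + 1) ∈ (fbRun prev t).2))) := by
        apply List.filter_congr
        intro y hy
        have hyge := hrest _ hy
        have hiff : ((y + 1) ∈ prev :: t) ↔ ((y + 1) ∈ (fbRun prev t).2) := by
          rw [hmemL]
          exact ⟨fun h => h.resolve_left (fun ⟨h1, h2⟩ => by omega), Or.inr⟩
        simp [hiff]
      have hrlen : (fbRun prev t).2.length ≤ n := by
        have h1 : (prev :: t).length ≤ n + 1 := hl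
        have h2 := fbRun_length_le prev t
        simp at h1
        omega
      set p1 : Int → Bool := fun x => !(decide ((x - 1) ∈ prev :: t)) with hP1
      set p2 : Int → Bool := fun x => !(decide ((x + 1) ∈ prev :: t)) with hP2
      rw [hl', List.filter_append, List.filter_append, hSblock, hEblock, hScongr, hEcongr]
      rw [← hl']
      show fbPart prev (fbRun prev t).1 ::
          List.zipWith fbPart
            ((fbRun prev t).2.filter (fun x => !(decide ((x - 1) ∈ (fbRun prev t).2))))
            ((fbRun prev t).2.filter (fun x => !(decide ((x + 1) ∈ (fbRun prev t).2)))) = fbParts (prev :: t)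
      rw [ih _ hrlen hpR, fbParts_cons]

-- B's sorted boundary filters equal the boundary filters of the sorted set list.
theorem sorted_filter_eq (pages : List Int) (f : Int → Int) :
    PySem.List.sorted ((PySem.Set.ofList pages).filter (fun x => !(PySem.Set.contains (PySem.Set.ofList pages) (f x)))) (fun x => x) false
      = (PySem.List.sorted (PySem.Set.ofList pages) (fun x => x) false).filter
          (fun x => !(decide ((f x) ∈ PySem.List.sorted (PySem.Set.ofList pages) (fun x => x) false))) := by
  have hperm : (PySem.List.sorted (PySem.Set.ofList pages) (fun x => x) false).Perm (PySem.Set.ofList pages) :=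
    PySem.List.sorted_perm _ _ _
  have hplt : (PySem.List.sorted (PySem.Set.ofList pages) (fun x => x) false).Pairwise (· < ·) :=
    PySem.List.sorted_ofList_pairwise_lt pages
  have hfeq : (PySem.Set.ofList pages).filter (fun x => !(PySem.Set.contains (PySem.Set.ofList pages) (f x)))
      = (PySem.Set.ofList pages).filter (fun x => !(decide ((f x) ∈ PySem.List.sorted (PySem.Set.ofList pages) (fun x => x) false))) := by
    apply List.filter_congr
    intro y _
    by_cases h : (f y) ∈ PySem.List.sorted (PySem.Set.ofList pages) (fun x => x) false
    · have h' : (f y) ∈ PySem.Set.ofList pages := hperm.mem_iff.1 h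
      simp [PySem.Set.contains, h, h']
    · have h' : ¬ (f y) ∈ PySem.Set.ofList pages := fun hc => h (hperm.mem_iff.2 hc)
      simp [PySem.Set.contains, h, h']
  rw [hfeq]
  exact PySem.List.sorted_eq_of_perm_of_pairwise_lt _ _ _ (hperm.filter _) (hplt.filter _)

-- ===== VERDICT (by name: the statement is the Claim_ definition above) =====
theorem format_page_ranges_spec : Claim_equal_format_page_ranges := by
  intro pages _
  unfold Spec_format_page_ranges format_page_ranges format_page_ranges_alt
  by_cases hp : pages = []
  · subst hp; rfl
  · simp only [hp, reduceIte]
    cases h : PySem.List.sorted (PySem.Set.ofList pages) (fun x => x) false with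
    | nil =>
      exfalso
      have h0 := (PySem.List.sorted_eq_nil_iff _ _ _).1 h
      rcases List.exists_mem_of_ne_nil pages hp with ⟨a, ha⟩
      have hmem : a ∈ PySem.Set.ofList pages := (PySem.Set.mem_ofList _ _).2 ha
      rw [h0] at hmem
      cases hmem
    | cons s0 tl =>
      dsimp only
      rw [faLoop_eq_fbParts]
      have hm1 := sorted_filter_eq pages (fun x => x - 1)
      have hp1 := sorted_filter_eq pages (fun x => x + 1)
      rw [h] at hm1 hp1
      rw [hm1, hp1,
        zip_filter_eq_fbParts (s0 :: tl).length (s0 :: tl) (le_refl _)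
          (h ▸ PySem.List.sorted_ofList_pairwise_lt pages)]
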